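-- pv_equiv track=rewrite | github.com/RobinMenestret/RobinMenestret | Pi/funny_function_for_pi.py | trouver_chaine_repeter
-- ===== SOURCE A (Python) =====
-- def trouver_chaine_repeter(texte, n):
--     # Créer un dictionnaire pour stocker les indices de début de chaque occurrence de la chaîne
--     occurrences = {}
--
--     # Parcourir le texte
--     for i in range(len(texte) - n + 1):
--         sous_chaine = texte[i:i + n]
--
--         # Vérifier si la sous-chaîne existe déjà dans le dictionnaire des occurrences
--         if sous_chaine in occurrences:
--             # Si oui, vérifier si la distance entre les occurrences est supérieure ou égale à n
--             if i - occurrences[sous_chaine] >= n: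
--                 return sous_chaine  # Retourner la première sous-chaîne qui se répète
--         else:
--             # Si la sous-chaîne n'existe pas encore dans le dictionnaire, l'ajouter avec son index
--             occurrences[sous_chaine] = i
--
--     return None  # Si aucune sous-chaîne n'est trouvée qui se répète
-- ===== SOURCE B (Python) =====
-- def trouver_chaine_repeter(texte, n):
--     # Brute force: for each window, scan earlier window starts directly
--     # instead of maintaining a first-occurrence dictionary.
--     for i in range(len(texte) - n + 1):
--         s = texte[i:i + n]
--         for p in range(i):
--             if i - p >= n and texte[p:p + n] == s:
--                 return s
--     return None
-- ===== Notes on version B (the rewrite author's own statement) =====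
-- stated objective: simpler
-- what changed: Replaces the first-occurrence dictionary with a direct nested scan over earlier window starts (no auxiliary state); correct because the first occurrence is the farthest, so some earlier occurrence at distance >= n exists iff the first one is.
import Mathlib
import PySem

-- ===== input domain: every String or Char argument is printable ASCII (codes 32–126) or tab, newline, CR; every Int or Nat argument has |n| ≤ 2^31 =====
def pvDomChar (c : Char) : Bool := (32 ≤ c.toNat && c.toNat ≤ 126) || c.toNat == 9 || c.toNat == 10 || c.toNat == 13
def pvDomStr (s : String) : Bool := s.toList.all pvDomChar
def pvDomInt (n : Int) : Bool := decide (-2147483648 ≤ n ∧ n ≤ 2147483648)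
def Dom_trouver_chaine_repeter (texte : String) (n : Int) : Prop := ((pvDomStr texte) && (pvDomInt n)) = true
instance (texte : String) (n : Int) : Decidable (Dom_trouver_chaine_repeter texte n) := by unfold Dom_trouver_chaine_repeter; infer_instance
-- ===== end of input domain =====

-- B replaces A's first-occurrence dictionary with a direct nested scan over
-- earlier window starts (simpler, no auxiliary state; not faster).

-- ===== PORT A =====
-- the loop 'for i in range(len(texte) - n + 1)' (lazy counter, as Python's range) with the dict 'occurrences'
def pvALoop (t : String) (n top : Int) (i : Int) (occ : PySem.Dict String Int) :
    Option String :=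
  if _h : i < top then
    let sous_chaine := PySem.Str.slice t (some i) (some (i + n))
    match occ.get? sous_chaine with           -- 'if sous_chaine in occurrences' + lookup
    | some j => if n ≤ i - j then some sous_chaine else pvALoop t n top (i + 1) occ
    | none => pvALoop t n top (i + 1) (occ.insert sous_chaine i)
  else none
termination_by (top - i).toNat
decreasing_by all_goals omega

def trouver_chaine_repeter (texte : String) (n : Int) : Option String :=
  pvALoop texte n (PySem.Str.len texte - n + 1) 0 PySem.Dict.empty

-- ===== PORT B =====
-- inner loop 'for p in range(i)'
def pvBInner (t : String) (n i : Int) (s : String) (p : Int) : Option String :=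
  if h : p < i then
    if n ≤ i - p ∧ PySem.Str.slice t (some p) (some (p + n)) = s then some s
    else pvBInner t n i s (p + 1)
  else none
termination_by (i - p).toNat
decreasing_by omega

-- outer loop 'for i in range(len(texte) - n + 1)'
def pvBLoop (t : String) (n top : Int) (i : Int) : Option String :=
  if _h : i < top then
    let s := PySem.Str.slice t (some i) (some (i + n))
    match pvBInner t n i s 0 with
    | some r => some r
    | none => pvBLoop t n top (i + 1)
  else none
termination_by (top - i).toNat
decreasing_by omega

def trouver_chaine_repeter_alt (texte : String) (n : Int) : Option String :=
  pvBLoop texte n (PySem.Str.len texte - n + 1) 0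

-- ===== PRECONDITION & SPEC =====
def Spec_trouver_chaine_repeter (texte : String) (n : Int) (out : Option String) : Prop := out = trouver_chaine_repeter_alt texte n
instance (texte : String) (n : Int) (out : Option String) : Decidable (Spec_trouver_chaine_repeter texte n out) := by unfold Spec_trouver_chaine_repeter; infer_instance

-- ===== CLAIM (what is proved, stated in full; the proofs are below) =====
def Claim_equal_trouver_chaine_repeter : Prop := ∀ (texte : String) (n : Int), Dom_trouver_chaine_repeter texte n → Spec_trouver_chaine_repeter texte n (trouver_chaine_repeter texte n)

-- ===== LEMMAS AND PROOFS =====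

-- abbreviation used only by the proofs: the window starting at j
def pvSl (t : String) (n j : Int) : String := PySem.Str.slice t (some j) (some (j + n))

-- loop invariant for A's dictionary at outer index i
def pvInv (t : String) (n : Int) (occ : PySem.Dict String Int) (i : Int) : Prop :=
  (∀ s j, occ.get? s = some j →
      0 ≤ j ∧ j < i ∧ pvSl t n j = s ∧ ∀ p, 0 ≤ p → p < j → pvSl t n p ≠ s) ∧
  (∀ p, 0 ≤ p → p < i → (occ.get? (pvSl t n p)).isSome)

theorem pvBInner_some (t : String) (n i : Int) (s : String) :
    ∀ (k : Nat) (p0 : Int), (i - p0).toNat = k →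
    (∃ p, p0 ≤ p ∧ p < i ∧ n ≤ i - p ∧ pvSl t n p = s) →
    pvBInner t n i s p0 = some s := by
  intro k
  induction k with
  | zero =>
    intro p0 hk ⟨p, h1, h2, _, _⟩
    omega
  | succ k ih =>
    intro p0 hk ⟨p, h1, h2, h3, h4⟩
    have hlt : p0 < i := by omega
    rw [pvBInner, dif_pos hlt]
    by_cases hq : n ≤ i - p0 ∧ PySem.Str.slice t (some p0) (some (p0 + n)) = s
    · rw [if_pos hq]
    · rw [if_neg hq]
      apply ih (p0 + 1) (by omega)
      refine ⟨p, ?_, h2, h3, h4⟩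
      rcases lt_or_eq_of_le h1 with h' | h'
      · omega
      · exact absurd ⟨by omega, h' ▸ h4⟩ hq

theorem pvBInner_none (t : String) (n i : Int) (s : String) :
    ∀ (k : Nat) (p0 : Int), (i - p0).toNat = k →
    (∀ p, p0 ≤ p → p < i → ¬(n ≤ i - p ∧ pvSl t n p = s)) →
    pvBInner t n i s p0 = none := by
  intro k
  induction k with
  | zero =>
    intro p0 hk _
    rw [pvBInner, dif_neg (by omega)]
  | succ k ih =>
    intro p0 hk h
    have hlt : p0 < i := by omega
    rw [pvBInner, dif_pos hlt]
    rw [if_neg (show ¬(n ≤ i - p0 ∧ PySem.Str.slice t (some p0) (some (p0 + n)) = s) from h p0 le_rfl hlt)]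
    exact ih (p0 + 1) (by omega) (fun p hp1 hp2 => h p (by omega) hp2)

theorem pvLoops_eq (t : String) (n : Int) (top : Int) :
    ∀ (k : Nat) (i : Int) (occ : PySem.Dict String Int), (top - i).toNat = k →
    0 ≤ i → pvInv t n occ i →
    pvALoop t n top i occ = pvBLoop t n top i := by
  intro k
  induction k with
  | zero =>
    intro i occ hk _ _
    rw [pvALoop, pvBLoop, dif_neg (by omega), dif_neg (by omega)]
  | succ k ih =>
    intro i occ hk hi hInv
    have hlt : i < top := by omega
    obtain ⟨hInv1, hInv2⟩ := hInv
    rw [pvALoop, pvBLoop, dif_pos hlt, dif_pos hlt]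
    dsimp only
    cases hocc : occ.get? (PySem.Str.slice t (some i) (some (i + n))) with
    | some j =>
      dsimp only
      obtain ⟨hj0, hji, hsl, hfirst⟩ := hInv1 _ _ hocc
      by_cases hcond : n ≤ i - j
      · -- A returns; B's inner scan finds p = j
        rw [pvBInner_some t n i _ (i - 0).toNat 0 rfl ⟨j, hj0, hji, hcond, hsl⟩]
        rw [if_pos hcond]
      · -- neither returns: every earlier equal window is at distance < n
        rw [pvBInner_none t n i _ (i - 0).toNat 0 rfl ?noearly]
        case noearly =>
          intro p hp0 hpi ⟨hpn, hps⟩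
          have hjp : j ≤ p := by
            by_contra hlt'
            exact hfirst p hp0 (by omega) hps
          omega
        rw [if_neg hcond]
        apply ih (i + 1) occ (by omega) (by omega)
        refine ⟨fun s j' h => ?_, fun p h0 hpi => ?_⟩
        · obtain ⟨a, b, c, d⟩ := hInv1 s j' h
          exact ⟨a, by omega, c, d⟩
        · rcases lt_or_eq_of_le (by omega : p ≤ i) with h' | h'
          · exact hInv2 p h0 h'
          · subst h'
            rw [show pvSl t n p = PySem.Str.slice t (some p) (some (p + n)) from rfl, hocc]
            simp
    | none =>
      -- new window: B's inner scan finds nothing, A inserts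
      dsimp only
      rw [pvBInner_none t n i _ (i - 0).toNat 0 rfl ?fresh]
      case fresh =>
        intro p hp0 hpi ⟨_, hps⟩
        have := hInv2 p hp0 hpi
        rw [hps] at this
        rw [hocc] at this
        simp at this
      apply ih (i + 1) _ (by omega) (by omega)
      constructor
      · intro s j' h
        rw [PySem.Dict.get?_insert] at h
        split_ifs at h with hs
        · subst hs
          have hij : i = j' := by injection h
          subst hij
          refine ⟨hi, by omega, rfl, fun p h0 hpj => ?_⟩
          intro hps
          have := hInv2 p h0 hpj
          rw [hps] at this
          rw [hocc] at this
          simp at this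
        · obtain ⟨a, b, c, d⟩ := hInv1 s j' h
          exact ⟨a, by omega, c, d⟩
      · intro p h0 hpi
        rw [PySem.Dict.get?_insert]
        split_ifs with hs
        · simp
        · rcases lt_or_eq_of_le (by omega : p ≤ i) with h' | h'
          · exact hInv2 p h0 h'
          · subst h'
            exact absurd rfl hs

-- ===== VERDICT (by name: the statement is the Claim_ definition above) =====
theorem trouver_chaine_repeter_spec : Claim_equal_trouver_chaine_repeter := by
  intro texte n _
  unfold Spec_trouver_chaine_repeter trouver_chaine_repeter trouver_chaine_repeter_alt
  exact pvLoops_eq texte n _ (PySem.Str.len texte - n + 1 - 0).toNat 0 PySem.Dict.empty rfl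
    le_rfl ⟨fun s j h => by simp [PySem.Dict.get?_empty] at h, fun p h0 hp => by omega⟩
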